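-- pv_equiv track=rewrite | github.com/ctrueden/stepml | src/stepml/generate_calculated_ratings.py | convert_chart_type_to_stepmania_format
-- ===== SOURCE A (Python) =====
-- def convert_chart_type_to_stepmania_format(chart_type: str) -> str:
--     """
--     Convert chart type from raw format to StepMania's internal format.
--
--     Examples:
--         dance-single -> Dance_Single
--         dance-double -> Dance_Double
--         pump-single -> Pump_Single
--
--     This matches the logic in StepMania's StepsTypeToString function:
--     - Replace hyphens with underscores
--     - Capitalize first letter and any letter after underscore
--     """
--     # Replace hyphens with underscores
--     result = chart_type.replace('-', '_')
--
--     # Capitalize first letter and any letter after underscore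
--     chars = list(result)
--     capitalize_next = True
--
--     for i in range(len(chars)):
--         if capitalize_next:
--             chars[i] = chars[i].upper()
--             capitalize_next = False
--
--         if chars[i] == '_':
--             capitalize_next = True
--
--     return ''.join(chars)
-- ===== SOURCE B (Python) =====
-- def convert_chart_type_to_stepmania_format(chart_type: str) -> str:
--     parts = chart_type.replace('-', '_').split('_')
--     return '_'.join(p[:1].upper() + p[1:] for p in parts)
-- ===== Notes on version B (the rewrite author's own statement) =====
-- stated objective: simpler
-- what changed: Replaced A's character-by-character scan carrying a capitalize_next flag by a split-on-underscore / capitalize-each-segment-head / rejoin pipeline built from str.split and str.join.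
import Mathlib
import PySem

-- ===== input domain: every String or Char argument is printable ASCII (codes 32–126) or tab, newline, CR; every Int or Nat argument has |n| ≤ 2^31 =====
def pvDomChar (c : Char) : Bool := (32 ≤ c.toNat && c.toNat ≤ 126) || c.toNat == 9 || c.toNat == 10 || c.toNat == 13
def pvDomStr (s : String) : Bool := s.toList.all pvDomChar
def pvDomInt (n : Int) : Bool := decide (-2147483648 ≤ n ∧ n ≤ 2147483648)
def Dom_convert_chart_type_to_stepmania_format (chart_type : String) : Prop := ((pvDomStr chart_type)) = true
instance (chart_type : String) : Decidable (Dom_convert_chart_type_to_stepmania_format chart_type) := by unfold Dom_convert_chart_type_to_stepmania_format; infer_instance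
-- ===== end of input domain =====

-- B replaces A's stateful capitalize_next character scan by split('_') / capitalize each
-- segment's first char / '_'.join — simpler, same O(n) cost.

-- ===== PORT A =====
-- the loop over range(len(chars)) mutating chars[i] in place, as a fold carrying
-- (output characters so far, capitalize_next)
def convert_chart_type_to_stepmania_format (chart_type : String) : String :=
  let result := PySem.Str.replace chart_type "-" "_"
  let final := result.toList.foldl
    (fun (st : List Char × Bool) c =>
      let c1 := if st.2 then PySem.Chars.upperChar c else c
      (st.1 ++ [c1], c1 == '_'))
    ([], true)
  String.ofList final.1   -- ''.join(chars): the string of exactly these characters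

-- ===== PORT B =====
-- the per-part expression p[:1].upper() + p[1:]
def pvCap (p : List Char) : List Char :=
  PySem.Chars.upper (PySem.List.slice p none (some 1)) ++ PySem.List.slice p (some 1) none

def convert_chart_type_to_stepmania_format_alt (chart_type : String) : String :=
  let result := PySem.Str.replace chart_type "-" "_"
  let parts := PySem.Chars.splitOn result.toList ['_']
  String.ofList (PySem.Chars.join ['_'] (parts.map pvCap))

-- ===== PRECONDITION & SPEC =====
def Spec_convert_chart_type_to_stepmania_format (chart_type : String) (out : String) : Prop := out = convert_chart_type_to_stepmania_format_alt chart_type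
instance (chart_type : String) (out : String) : Decidable (Spec_convert_chart_type_to_stepmania_format chart_type out) := by unfold Spec_convert_chart_type_to_stepmania_format; infer_instance

-- ===== CLAIM (what is proved, stated in full; the proofs are below) =====
def Claim_equal_convert_chart_type_to_stepmania_format : Prop := ∀ (chart_type : String), Dom_convert_chart_type_to_stepmania_format chart_type → Spec_convert_chart_type_to_stepmania_format chart_type (convert_chart_type_to_stepmania_format chart_type)

-- ===== LEMMAS AND PROOFS =====

-- split at '_' as a structural recursion returning (first segment, remaining segments)
def pvSp : List Char → List Char × List (List Char)
  | [] => ([], [])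
  | x :: xs =>
      let r := pvSp xs
      if x = '_' then ([], r.1 :: r.2) else (x :: r.1, r.2)

-- A's per-character pass as a structural recursion on the character list
def pvSpec : Bool → List Char → List Char
  | _, [] => []
  | cap, c :: cs =>
      let c1 := if cap then PySem.Chars.upperChar c else c
      c1 :: pvSpec (c1 == '_') cs

lemma pvFoldA (l : List Char) : ∀ (acc : List Char) (cap : Bool),
    (l.foldl
      (fun (st : List Char × Bool) c =>
        let c1 := if st.2 then PySem.Chars.upperChar c else c
        (st.1 ++ [c1], c1 == '_'))
      (acc, cap)).1 = acc ++ pvSpec cap l := by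
  induction l with
  | nil => intro acc cap; simp [pvSpec]
  | cons c cs ih => intro acc cap; simp [List.foldl, pvSpec, ih]

lemma pvGo (l : List Char) : ∀ (fuel : Nat) (cur : List Char) (acc : List (List Char)),
    l.length ≤ fuel →
    PySem.Chars.splitOn.go ['_'] fuel l cur acc
      = acc.reverse ++ (cur.reverse ++ (pvSp l).1) :: (pvSp l).2 := by
  induction l with
  | nil =>
      intro fuel cur acc _
      cases fuel <;> simp [PySem.Chars.splitOn.go, pvSp]
  | cons x xs ih =>
      intro fuel cur acc h
      cases fuel with
      | zero => simp at h
      | succ f =>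
          by_cases hx : x = '_'
          · subst hx
            simp only [PySem.Chars.splitOn.go, List.isPrefixOf, pvSp]
            simp [ih f [] (cur.reverse :: acc) (by simpa using h)]
          · simp only [PySem.Chars.splitOn.go, List.isPrefixOf, pvSp]
            have hne : ('_' == x) = false := by
              simp; exact fun h' => hx h'.symm
            simp [hne, hx, ih f (x :: cur) acc (by simpa using h)]

lemma pvSplitOn (l : List Char) :
    PySem.Chars.splitOn l ['_'] = (pvSp l).1 :: (pvSp l).2 := by
  simpa using pvGo l (l.length + 1) [] [] (by omega)

lemma pvCap_nil : pvCap [] = [] := by decide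

lemma pvCap_cons (c : Char) (p : List Char) :
    pvCap (c :: p) = PySem.Chars.upperChar c :: p := by
  simp [pvCap, PySem.List.slice, PySem.Chars.upper]

lemma pvJoin (p : List Char) (ps : List (List Char)) :
    PySem.Chars.join ['_'] (pvCap p :: ps.map pvCap)
      = pvCap p ++ ps.flatMap (fun q => '_' :: pvCap q) := by
  induction ps generalizing p with
  | nil => simp [PySem.Chars.join, List.intercalate]
  | cons q qs ih =>
      rw [List.map_cons, PySem.Chars.join_cons_cons, ih q]
      simp

lemma pvUpperChar_ne_underscore (c : Char) (h : c ≠ '_') :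
    (PySem.Chars.upperChar c == '_') = false := by
  unfold PySem.Chars.upperChar
  split
  · next hl =>
      have ha : 'a' ≤ c ∧ c ≤ 'z' := by simpa [PySem.Chars.islower] using hl
      have h1 : 97 ≤ c.toNat := Nat.succ_le_of_lt ha.1
      have h2 : c.toNat ≤ 122 := by
        have hz := ha.2; rw [Char.le_def, UInt32.le_iff_toNat_le] at hz; exact hz
      simp only [beq_eq_false_iff_ne]
      intro hc
      have hv : (c.toNat - 32).isValidChar := Or.inl (by omega)
      have hts : (Char.ofNat (c.toNat - 32)).toNat = '_'.toNat := by rw [hc]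
      rw [Char.toNat_ofNat, if_pos hv] at hts
      have h95 : '_'.toNat = 95 := by decide
      omega
  · simpa [beq_eq_false_iff_ne] using h

lemma pvMain (l : List Char) :
    (pvCap (pvSp l).1 ++ ((pvSp l).2).flatMap (fun q => '_' :: pvCap q) = pvSpec true l)
    ∧ ((pvSp l).1 ++ ((pvSp l).2).flatMap (fun q => '_' :: pvCap q) = pvSpec false l) := by
  induction l with
  | nil => exact ⟨by simp [pvSp, pvSpec, pvCap_nil], by simp [pvSp, pvSpec]⟩
  | cons x xs ih =>
      by_cases hx : x = '_'
      · subst hx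
        have hu : PySem.Chars.upperChar '_' = '_' := by decide
        constructor <;>
          simp [pvSp, pvSpec, pvCap_nil, hu, ih.1]
      · have hne : (x == '_') = false := by simpa [beq_eq_false_iff_ne] using hx
        have hneu := pvUpperChar_ne_underscore x hx
        constructor
        · cases h1 : (pvSp xs).1 with
          | nil =>
              have := ih.2
              simp [pvSp, hx, pvSpec, hneu, pvCap_cons, h1] at this ⊢
              simpa [h1] using this
          | cons y ys =>
              have := ih.2
              simp [pvSp, hx, pvSpec, hneu, pvCap_cons, h1] at this ⊢
              simpa [h1] using this
        · have := ih.2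
          simp [pvSp, hx, pvSpec, hne] at this ⊢
          exact this

-- ===== VERDICT (by name: the statement is the Claim_ definition above) =====
theorem convert_chart_type_to_stepmania_format_spec : Claim_equal_convert_chart_type_to_stepmania_format := by
  intro chart_type _
  unfold Spec_convert_chart_type_to_stepmania_format
  unfold convert_chart_type_to_stepmania_format convert_chart_type_to_stepmania_format_alt
  simp only [pvSplitOn, List.map_cons]
  rw [pvFoldA]
  rw [pvJoin, (pvMain _).1]
  rfl
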